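-- pv_equiv track=rewrite | github.com/RobinRodenhausen/adventofcode2024 | 20/day20.py | dijkstra_with_cheats
-- ===== SOURCE A (Python) =====
-- import heapq
--
-- DIRECTIONS = {"N": (0, -1), "E": (1, 0), "S": (0, 1), "W": (-1, 0)}
--
-- def dijkstra_with_cheats(map: list[list[bool]], start: tuple[int, int]) -> dict[tuple[int, int, int], int]:
--     max_y, max_x = len(map), len(map[0])
--     start_state: tuple[int, int, int] = (*start, 1)
--
--     priority_queue: list[tuple[tuple[int, int, int], int]] = []
--     heapq.heappush(priority_queue, (start_state, 0))
--     visited: dict[tuple[int, int, int], int] = {start_state: 0}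
--
--     while priority_queue:
--         (x, y, cheats), score = heapq.heappop(priority_queue)
--         if visited.get((x, y, cheats), float("inf")) < score:
--             continue
--
--         for direction in DIRECTIONS:
--             dx, dy = DIRECTIONS[direction]
--             new_x, new_y = x + dx, y + dy
--             if 0 <= new_x < max_x and 0 <= new_y < max_y:  # and grid[new_y][new_x]:
--                 if map[new_y][new_x]:
--                     new_score = score + 1
--                     new_cheats = cheats
--                 elif not map[new_y][new_x] and cheats > 0:
--                     new_score = score + 1
--                     new_cheats = cheats - 1
--                 else:
--                     continue
--
--                 if new_score < visited.get((new_x, new_y, new_cheats), float("inf")):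
--                     visited[(new_x, new_y, new_cheats)] = new_score
--                     heapq.heappush(priority_queue, ((new_x, new_y, new_cheats), new_score))
--
--     return visited
-- ===== SOURCE B (Python) =====
-- def dijkstra_with_cheats(map: list[list[bool]], start: tuple[int, int]) -> dict[tuple[int, int, int], int]:
--     max_y, max_x = len(map), len(map[0])
--     start_state = (*start, 1)
--     visited = {start_state: 0}
--     pending = [start_state]
--
--     while pending:
--         state = min(pending)
--         pending.remove(state)
--         x, y, cheats = state
--         score = visited[state]
--         for dx, dy in ((0, -1), (1, 0), (0, 1), (-1, 0)):
--             nx, ny = x + dx, y + dy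
--             if 0 <= nx < max_x and 0 <= ny < max_y:
--                 cell = map[ny][nx]
--                 if cell or cheats > 0:
--                     key = (nx, ny, cheats if cell else cheats - 1)
--                     if key not in visited or score + 1 < visited[key]:
--                         visited[key] = score + 1
--                         pending.append(key)
--     return visited
-- ===== Notes on version B (the rewrite author's own statement) =====
-- stated objective: simpler
-- what changed: Replaces the heap of (state, score) pairs and the stale-entry check by a plain worklist of states only: each round takes min(pending), re-reads the state's current score from visited, and relaxes; stale heap entries and the float('inf') sentinel disappear entirely (duplicate states in the worklist are provably no-ops).
import Mathlib
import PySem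

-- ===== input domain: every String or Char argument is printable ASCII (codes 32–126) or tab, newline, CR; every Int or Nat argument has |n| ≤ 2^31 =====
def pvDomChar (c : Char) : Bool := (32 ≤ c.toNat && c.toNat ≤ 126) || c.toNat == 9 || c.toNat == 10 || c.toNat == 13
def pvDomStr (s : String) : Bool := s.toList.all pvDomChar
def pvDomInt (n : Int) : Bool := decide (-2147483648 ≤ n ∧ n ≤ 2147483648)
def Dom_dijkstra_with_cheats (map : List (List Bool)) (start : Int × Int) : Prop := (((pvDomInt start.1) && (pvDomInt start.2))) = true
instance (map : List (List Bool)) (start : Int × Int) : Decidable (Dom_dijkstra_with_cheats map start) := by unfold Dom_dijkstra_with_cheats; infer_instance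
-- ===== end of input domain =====

-- B replaces A's heap of (state, score) pairs and its stale-entry check by a plain worklist of STATES only:
-- each round takes min(pending) and re-reads the state's current score from visited (objective: simpler —
-- no heap, no scores in the queue, no stale branch, no float('inf') sentinel). The equivalence is about the
-- RETURN value (neither Python mutates its arguments). Both loop ports carry a fuel argument as a totality
-- guard only; the fuel bound exceeds the number of queue pops either Python loop can perform.

-- ===== PORT A =====
-- map[new_y][new_x] (exact under Pre_: both indices are in bounds there)
def pvCell (map : List (List Bool)) (nx ny : Int) : Bool :=
  (PySem.List.pyGet? ((PySem.List.pyGet? map ny).getD []) nx).getD false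

-- Python '<' on ((x, y, c), score) heap entries: lexicographic tuple order
def pvLtE (a b : (Int × Int × Int) × Int) : Bool :=
  if a.1.1 < b.1.1 then true else if b.1.1 < a.1.1 then false
  else if a.1.2.1 < b.1.2.1 then true else if b.1.2.1 < a.1.2.1 then false
  else if a.1.2.2 < b.1.2.2 then true else if b.1.2.2 < a.1.2.2 then false
  else decide (a.2 < b.2)

-- DIRECTIONS.values() in iteration order N, E, S, W
def pvDirs : List (Int × Int) := [(0, -1), (1, 0), (0, 1), (-1, 0)]

-- 'new_score < visited.get(key, float("inf"))' (scores are finite ints, so the inf default = key absent)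
def pvImproves (vis : PySem.Dict (Int × Int × Int) Int) (key : Int × Int × Int) (ns : Int) : Bool :=
  match PySem.Dict.get? vis key with | some v => decide (ns < v) | none => true

-- 'visited.get(state, float("inf")) < score'
def pvStale (vis : PySem.Dict (Int × Int × Int) Int) (key : Int × Int × Int) (score : Int) : Bool :=
  match PySem.Dict.get? vis key with | some v => decide (v < score) | none => false

-- A's relaxation tail: update visited and heappush; the heap is ported by its contract (heappop returns the
-- smallest element, tuples of ints form a total order), as a list kept sorted: push = ordered insert, pop = head
def pvPushA (q : List ((Int × Int × Int) × Int)) (vis : PySem.Dict (Int × Int × Int) Int)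
    (nx ny nc ns : Int) : List ((Int × Int × Int) × Int) × PySem.Dict (Int × Int × Int) Int :=
  if pvImproves vis (nx, ny, nc) ns then
    (PySem.List.insertBy pvLtE ((nx, ny, nc), ns) q, PySem.Dict.insert vis (nx, ny, nc) ns)
  else (q, vis)

-- A's body of 'for direction in DIRECTIONS'
def pvRelaxA (map : List (List Bool)) (mx my x y c score : Int)
    (acc : List ((Int × Int × Int) × Int) × PySem.Dict (Int × Int × Int) Int) (d : Int × Int) :
    List ((Int × Int × Int) × Int) × PySem.Dict (Int × Int × Int) Int :=
  let nx := x + d.1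
  let ny := y + d.2
  if 0 ≤ nx ∧ nx < mx ∧ 0 ≤ ny ∧ ny < my then
    if pvCell map nx ny then pvPushA acc.1 acc.2 nx ny c (score + 1)
    else if 0 < c then pvPushA acc.1 acc.2 nx ny (c - 1) (score + 1)
    else acc
  else acc

-- A's while-loop over the priority queue
def pvRunA (map : List (List Bool)) (mx my : Int) :
    Nat → List ((Int × Int × Int) × Int) → PySem.Dict (Int × Int × Int) Int →
    PySem.Dict (Int × Int × Int) Int
  | 0, _, vis => vis
  | _ + 1, [], vis => vis
  | f + 1, e :: rest, vis =>
    if pvStale vis e.1 e.2 then pvRunA map mx my f rest vis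
    else
      let r := pvDirs.foldl (pvRelaxA map mx my e.1.1 e.1.2.1 e.1.2.2 e.2) (rest, vis)
      pvRunA map mx my f r.1 r.2

def dijkstra_with_cheats (map : List (List Bool)) (start : Int × Int) : List (Int × Int × Int × Int) :=
  let my : Int := (map.length : Int)
  let mx : Int := (((PySem.List.pyGet? map 0).getD []).length : Int)
  let s0 : Int × Int × Int := (start.1, start.2, 1)
  let q0 := PySem.List.insertBy pvLtE (s0, (0 : Int)) []   -- heappush into the empty list
  let vis0 := PySem.Dict.insert (PySem.Dict.empty : PySem.Dict (Int × Int × Int) Int) s0 0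
  let fuel := (2 * map.length * ((PySem.List.pyGet? map 0).getD []).length + 4) ^ 2
  (pvRunA map mx my fuel q0 vis0).items.map (fun p => (p.1.1, p.1.2.1, p.1.2.2, p.2))

-- ===== PORT B =====
-- Python '<' on (x, y, c) state triples: lexicographic
def pvLtK (a b : Int × Int × Int) : Bool :=
  if a.1 < b.1 then true else if b.1 < a.1 then false
  else if a.2.1 < b.2.1 then true else if b.2.1 < a.2.1 then false
  else decide (a.2.2 < b.2.2)

-- 'pending.remove(state)': drop the first occurrence
def pvEraseK (e : Int × Int × Int) : List (Int × Int × Int) → List (Int × Int × Int)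
  | [] => []
  | h :: t => if h = e then t else h :: pvEraseK e t

-- 'key not in visited or new_score < visited[key]'
def pvBetter (vis : PySem.Dict (Int × Int × Int) Int) (key : Int × Int × Int) (ns : Int) : Bool :=
  !(PySem.Dict.contains vis key) || decide (ns < PySem.Dict.getD vis key 0)

-- B's body of 'for dx, dy in …'
def pvRelaxB (map : List (List Bool)) (mx my x y c score : Int)
    (acc : List (Int × Int × Int) × PySem.Dict (Int × Int × Int) Int) (d : Int × Int) :
    List (Int × Int × Int) × PySem.Dict (Int × Int × Int) Int :=
  let nx := x + d.1
  let ny := y + d.2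
  if 0 ≤ nx ∧ nx < mx ∧ 0 ≤ ny ∧ ny < my then
    if pvCell map nx ny ∨ 0 < c then
      let key : Int × Int × Int := (nx, ny, if pvCell map nx ny then c else c - 1)
      if pvBetter acc.2 key (score + 1) then (acc.1 ++ [key], PySem.Dict.insert acc.2 key (score + 1))
      else acc
    else acc
  else acc

-- B's while-loop: state = min(pending) (first minimal element), remove it, score = visited[state]
-- ('visited[state]' is ported with a default that is never consulted: states enter pending only
-- when they are inserted into visited, so the key is always present where Python returns)
def pvRunB (map : List (List Bool)) (mx my : Int) :
    Nat → List (Int × Int × Int) → PySem.Dict (Int × Int × Int) Int →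
    PySem.Dict (Int × Int × Int) Int
  | 0, _, vis => vis
  | _ + 1, [], vis => vis
  | f + 1, h :: t, vis =>
    let s := t.foldl (fun a b => if pvLtK b a then b else a) h
    let rest := pvEraseK s (h :: t)
    let score := PySem.Dict.getD vis s 0
    let r := pvDirs.foldl (pvRelaxB map mx my s.1 s.2.1 s.2.2 score) (rest, vis)
    pvRunB map mx my f r.1 r.2

def dijkstra_with_cheats_alt (map : List (List Bool)) (start : Int × Int) : List (Int × Int × Int × Int) :=
  let my : Int := (map.length : Int)
  let mx : Int := (((PySem.List.pyGet? map 0).getD []).length : Int)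
  let s0 : Int × Int × Int := (start.1, start.2, 1)
  let vis0 := PySem.Dict.insert (PySem.Dict.empty : PySem.Dict (Int × Int × Int) Int) s0 0
  let fuel := (2 * map.length * ((PySem.List.pyGet? map 0).getD []).length + 4) ^ 2
  (pvRunB map mx my fuel [s0] vis0).items.map (fun p => (p.1.1, p.1.2.1, p.1.2.2, p.2))

-- ===== PRECONDITION & SPEC =====
-- Pre_ excludes the empty map (A raises IndexError on map[0]) and maps with a row shorter than row 0
-- unless the start lies so far outside the grid that A can take no step (A raises IndexError when the
-- walk reaches a short row; on the rare ragged maps whose short rows are unreachable from an in-range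
-- start A still returns — see the cite in claim.json).
def Pre_dijkstra_with_cheats (map : List (List Bool)) (start : Int × Int) : Prop :=
  map ≠ [] ∧ ((∀ row ∈ map, (map.headD []).length ≤ row.length) ∨
    start.1 < -1 ∨ ((map.headD []).length : Int) < start.1 ∨
    start.2 < -1 ∨ (map.length : Int) < start.2)
instance (map : List (List Bool)) (start : Int × Int) : Decidable (Pre_dijkstra_with_cheats map start) := by
  unfold Pre_dijkstra_with_cheats; infer_instance

def pvWitness_dijkstra_with_cheats : List (List Bool) × (Int × Int) := ([[true, true], [true, false]], (0, 0))

def Spec_dijkstra_with_cheats (map : List (List Bool)) (start : Int × Int) (out : List (Int × Int × Int × Int)) : Prop := out = dijkstra_with_cheats_alt map start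
instance (map : List (List Bool)) (start : Int × Int) (out : List (Int × Int × Int × Int)) : Decidable (Spec_dijkstra_with_cheats map start out) := by unfold Spec_dijkstra_with_cheats; infer_instance

-- ===== CLAIM (what is proved, stated in full; the proofs are below) =====
def Claim_equal_dijkstra_with_cheats : Prop := ∀ (map : List (List Bool)) (start : Int × Int), Dom_dijkstra_with_cheats map start → Pre_dijkstra_with_cheats map start → Spec_dijkstra_with_cheats map start (dijkstra_with_cheats map start)

-- ===== LEMMAS AND PROOFS =====

lemma pvLtE_iff (a b : (Int × Int × Int) × Int) :
    pvLtE a b = true ↔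
      (a.1.1 < b.1.1 ∨ (a.1.1 = b.1.1 ∧ (a.1.2.1 < b.1.2.1 ∨ (a.1.2.1 = b.1.2.1 ∧
        (a.1.2.2 < b.1.2.2 ∨ (a.1.2.2 = b.1.2.2 ∧ a.2 < b.2)))))) := by
  simp only [pvLtE]
  split_ifs <;> simp <;> omega

lemma pvLtE_false_iff (a b : (Int × Int × Int) × Int) :
    pvLtE a b = false ↔
      ¬ (a.1.1 < b.1.1 ∨ (a.1.1 = b.1.1 ∧ (a.1.2.1 < b.1.2.1 ∨ (a.1.2.1 = b.1.2.1 ∧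
        (a.1.2.2 < b.1.2.2 ∨ (a.1.2.2 = b.1.2.2 ∧ a.2 < b.2)))))) := by
  rw [← pvLtE_iff]
  cases h : pvLtE a b <;> simp

lemma pvLtK_iff (a b : Int × Int × Int) :
    pvLtK a b = true ↔
      (a.1 < b.1 ∨ (a.1 = b.1 ∧ (a.2.1 < b.2.1 ∨ (a.2.1 = b.2.1 ∧ a.2.2 < b.2.2)))) := by
  simp only [pvLtK]
  split_ifs <;> simp <;> omega

lemma pvLtK_false_iff (a b : Int × Int × Int) :
    pvLtK a b = false ↔
      ¬ (a.1 < b.1 ∨ (a.1 = b.1 ∧ (a.2.1 < b.2.1 ∨ (a.2.1 = b.2.1 ∧ a.2.2 < b.2.2)))) := by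
  rw [← pvLtK_iff]
  cases h : pvLtK a b <;> simp

lemma pvLtK_antisymm {a b : Int × Int × Int} (h : pvLtK a b = false) (h' : pvLtK b a = false) :
    a = b := by
  rw [pvLtK_false_iff] at h h'
  obtain ⟨a1, a2, a3⟩ := a
  obtain ⟨b1, b2, b3⟩ := b
  simp only [Prod.mk.injEq]
  refine ⟨by dsimp at h h'; omega, by dsimp at h h'; omega, by dsimp at h h'; omega⟩

-- an entry no smaller than another (tuple order) has a no-smaller state (state is compared first)
lemma pvLtE_false_state {a b : (Int × Int × Int) × Int} (h : pvLtE a b = false) :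
    pvLtK a.1 b.1 = false := by
  rw [pvLtE_false_iff] at h
  rw [pvLtK_false_iff]
  omega

lemma pvLtE_asymm {a b : (Int × Int × Int) × Int} (h : pvLtE a b = true) : pvLtE b a = false := by
  rw [pvLtE_iff] at h; rw [pvLtE_false_iff]; omega

lemma pvLtE_le_trans {a b c : (Int × Int × Int) × Int} (h : pvLtE b a = false)
    (h' : pvLtE c b = false) : pvLtE c a = false := by
  rw [pvLtE_false_iff] at h h' ⊢; omega

-- the queue invariant for A's sorted list
def pvSortedQ (l : List ((Int × Int × Int) × Int)) : Prop :=
  l.Pairwise (fun a b => pvLtE b a = false)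

lemma pvInsertBy_perm (x : (Int × Int × Int) × Int) (l : List ((Int × Int × Int) × Int)) :
    (PySem.List.insertBy pvLtE x l).Perm (x :: l) := by
  induction l with
  | nil => simp [PySem.List.insertBy]
  | cons y ys ih =>
    simp only [PySem.List.insertBy]
    split
    · exact List.Perm.refl _
    · exact (ih.cons y).trans (List.Perm.swap x y ys)

lemma pvInsertBy_sorted {x : (Int × Int × Int) × Int} {l : List ((Int × Int × Int) × Int)}
    (hs : pvSortedQ l) : pvSortedQ (PySem.List.insertBy pvLtE x l) := by
  induction l with
  | nil => simp [PySem.List.insertBy, pvSortedQ]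
  | cons y ys ih =>
    rw [pvSortedQ, List.pairwise_cons] at hs
    obtain ⟨hy, hys⟩ := hs
    simp only [PySem.List.insertBy]
    split
    · rename_i hlt
      rw [pvSortedQ, List.pairwise_cons]
      refine ⟨?_, ?_⟩
      · intro z hz
        rcases List.mem_cons.mp hz with rfl | hz
        · exact pvLtE_asymm hlt
        · exact pvLtE_le_trans (pvLtE_asymm hlt) (hy z hz)
      · exact List.Pairwise.cons hy hys
    · rename_i hnlt
      rw [pvSortedQ, List.pairwise_cons]
      refine ⟨?_, ih hys⟩
      intro z hz
      rw [PySem.List.mem_insertBy] at hz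
      rcases hz with rfl | hz
      · exact Bool.eq_false_iff.mpr (fun hc => hnlt hc)
      · exact hy z hz

lemma pvScanK_mem (t : List (Int × Int × Int)) (h : Int × Int × Int) :
    t.foldl (fun a b => if pvLtK b a then b else a) h ∈ h :: t := by
  induction t generalizing h with
  | nil => simp
  | cons b t' ih =>
    simp only [List.foldl_cons]
    by_cases hbh : pvLtK b h = true
    · simp only [hbh, if_true]
      rcases List.mem_cons.mp (ih b) with hm | hm
      · rw [hm]; simp
      · simp [hm]
    · simp only [if_neg hbh]
      rcases List.mem_cons.mp (ih h) with hm | hm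
      · rw [hm]; simp
      · simp [hm]

lemma pvLtK_le_trans {a b c : Int × Int × Int} (h : pvLtK b a = false)
    (h' : pvLtK c b = false) : pvLtK c a = false := by
  rw [pvLtK_false_iff] at h h' ⊢; omega

lemma pvScanK_min (t : List (Int × Int × Int)) (h : Int × Int × Int) :
    ∀ z ∈ h :: t, pvLtK z (t.foldl (fun a b => if pvLtK b a then b else a) h) = false := by
  induction t generalizing h with
  | nil =>
    intro z hz
    simp only [List.foldl_nil]
    rcases List.mem_cons.mp hz with rfl | hz'
    · rw [pvLtK_false_iff]; omega
    · cases hz'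
  | cons b t' ih =>
    intro z hz
    simp only [List.foldl_cons]
    by_cases hbh : pvLtK b h = true
    · simp only [hbh, if_true]
      rcases List.mem_cons.mp hz with rfl | hz'
      · refine pvLtK_le_trans (ih b b (by simp)) ?_
        rw [pvLtK_iff] at hbh; rw [pvLtK_false_iff]; omega
      · rcases List.mem_cons.mp hz' with rfl | hz''
        · exact ih z z (by simp)
        · exact ih b z (by simp [hz''])
    · simp only [if_neg hbh]
      rcases List.mem_cons.mp hz with rfl | hz'
      · exact ih z z (by simp)
      · rcases List.mem_cons.mp hz' with rfl | hz''
        · exact pvLtK_le_trans (ih h h (by simp)) (Bool.eq_false_iff.mpr hbh)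
        · exact ih h z (by simp [hz''])

lemma pvEraseK_perm {e : Int × Int × Int} {p : List (Int × Int × Int)} (he : e ∈ p) :
    (e :: pvEraseK e p).Perm p := by
  induction p with
  | nil => cases he
  | cons h t ih =>
    by_cases hhe : h = e
    · subst hhe; simp [pvEraseK]
    · have het : e ∈ t := by rcases List.mem_cons.mp he with rfl | ht; · exact absurd rfl hhe
                             · exact ht
      simp only [pvEraseK, if_neg hhe]
      exact (List.Perm.swap h e _).trans ((ih het).cons h)

-- B's test 'key not in visited or ns < visited[key]' is A's 'ns < visited.get(key, inf)'
lemma pvBetter_eq (vis : PySem.Dict (Int × Int × Int) Int) (key : Int × Int × Int) (ns : Int) :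
    pvBetter vis key ns = pvImproves vis key ns := by
  cases h : PySem.Dict.get? vis key with
  | none =>
    simp [pvBetter, pvImproves, h, PySem.Dict.contains_eq_isSome_get?]
  | some w =>
    simp [pvBetter, pvImproves, h, PySem.Dict.contains_eq_isSome_get?,
      PySem.Dict.getD_of_get?_eq_some vis 0 h]

-- pointwise 'no value has grown, no key has vanished'
def pvVisLE (v' v : PySem.Dict (Int × Int × Int) Int) : Prop :=
  ∀ k w, PySem.Dict.get? v k = some w → ∃ w', PySem.Dict.get? v' k = some w' ∧ w' ≤ w

lemma pvVisLE_refl (v : PySem.Dict (Int × Int × Int) Int) : pvVisLE v v :=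
  fun k w h => ⟨w, h, le_refl w⟩

lemma pvVisLE_trans {v1 v2 v3 : PySem.Dict (Int × Int × Int) Int} (h : pvVisLE v1 v2)
    (h' : pvVisLE v2 v3) : pvVisLE v1 v3 := by
  intro k w hw
  obtain ⟨w2, hw2, hle2⟩ := h' k w hw
  obtain ⟨w1, hw1, hle1⟩ := h k w2 hw2
  exact ⟨w1, hw1, le_trans hle1 hle2⟩

lemma pvVisLE_insert {vis : PySem.Dict (Int × Int × Int) Int} {key : Int × Int × Int} {n : Int}
    (h : ∀ w, PySem.Dict.get? vis key = some w → n < w) :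
    pvVisLE (PySem.Dict.insert vis key n) vis := by
  intro k w hw
  by_cases hk : k = key
  · subst hk
    exact ⟨n, PySem.Dict.get?_insert_self vis k n, le_of_lt (h w hw)⟩
  · exact ⟨w, by rw [PySem.Dict.get?_insert_of_ne vis n hk]; exact hw, le_refl w⟩

-- a valid cheat-aware neighbour step, and its target key
def pvOkN (map : List (List Bool)) (mx my x y c : Int) (d : Int × Int) : Prop :=
  (0 ≤ x + d.1 ∧ x + d.1 < mx ∧ 0 ≤ y + d.2 ∧ y + d.2 < my) ∧
  (pvCell map (x + d.1) (y + d.2) = true ∨ 0 < c)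

def pvKeyN (map : List (List Bool)) (x y c : Int) (d : Int × Int) : Int × Int × Int :=
  (x + d.1, y + d.2, if pvCell map (x + d.1) (y + d.2) then c else c - 1)

-- 'relaxing s at score v changes nothing': every valid neighbour already has a value ≤ v + 1
def pvNoop (map : List (List Bool)) (mx my : Int) (s : Int × Int × Int) (v : Int)
    (vis : PySem.Dict (Int × Int × Int) Int) : Prop :=
  ∀ d ∈ pvDirs, pvOkN map mx my s.1 s.2.1 s.2.2 d →
    ∃ w, PySem.Dict.get? vis (pvKeyN map s.1 s.2.1 s.2.2 d) = some w ∧ w ≤ v + 1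

lemma pvNoop_mono {map : List (List Bool)} {mx my : Int} {s : Int × Int × Int} {v : Int}
    {vis vis' : PySem.Dict (Int × Int × Int) Int} (hle : pvVisLE vis' vis)
    (h : pvNoop map mx my s v vis) : pvNoop map mx my s v vis' := by
  intro d hd hok
  obtain ⟨w, hw, hwle⟩ := h d hd hok
  obtain ⟨w', hw', hle'⟩ := hle _ w hw
  exact ⟨w', hw', le_trans hle' hwle⟩

-- a relaxation that cannot improve anything is the identity on B's side
lemma pvNoopFoldB (map : List (List Bool)) (mx my : Int) (s : Int × Int × Int) (v : Int) :
    ∀ (ds : List (Int × Int)) (p : List (Int × Int × Int)) (vis : PySem.Dict (Int × Int × Int) Int),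
      (∀ d ∈ ds, pvOkN map mx my s.1 s.2.1 s.2.2 d →
        ∃ w, PySem.Dict.get? vis (pvKeyN map s.1 s.2.1 s.2.2 d) = some w ∧ w ≤ v + 1) →
      ds.foldl (pvRelaxB map mx my s.1 s.2.1 s.2.2 v) (p, vis) = (p, vis) := by
  intro ds
  induction ds with
  | nil => intro p vis _; rfl
  | cons d ds ih =>
    intro p vis h
    have hstep : pvRelaxB map mx my s.1 s.2.1 s.2.2 v (p, vis) d = (p, vis) := by
      simp only [pvRelaxB]
      by_cases hb : 0 ≤ s.1 + d.1 ∧ s.1 + d.1 < mx ∧ 0 ≤ s.2.1 + d.2 ∧ s.2.1 + d.2 < my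
      · rw [if_pos hb]
        by_cases hp : pvCell map (s.1 + d.1) (s.2.1 + d.2) = true ∨ 0 < s.2.2
        · rw [if_pos hp]
          obtain ⟨w, hw, hwle⟩ := h d (by simp) ⟨hb, hp⟩
          have hbet : pvBetter vis (pvKeyN map s.1 s.2.1 s.2.2 d) (v + 1) = false := by
            rw [pvBetter_eq, pvImproves, hw]
            simp; omega
          simp only [pvKeyN] at hbet
          rw [if_neg (by simp [hbet])]
        · rw [if_neg hp]
      · rw [if_neg hb]
    rw [List.foldl_cons, hstep]
    exact ih p vis (fun d' hd' => h d' (by simp [hd']))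

-- one neighbour step: either both sides do nothing (and the target, if valid, is already ≤ score+1),
-- or both sides record the same improvement
lemma pvStep (map : List (List Bool)) (mx my x y c score : Int) (d : Int × Int)
    (q : List ((Int × Int × Int) × Int)) (p : List (Int × Int × Int))
    (vis : PySem.Dict (Int × Int × Int) Int) :
    (pvRelaxA map mx my x y c score (q, vis) d = (q, vis) ∧
     pvRelaxB map mx my x y c score (p, vis) d = (p, vis) ∧
     (pvOkN map mx my x y c d →
       ∃ w, PySem.Dict.get? vis (pvKeyN map x y c d) = some w ∧ w ≤ score + 1)) ∨
    (pvOkN map mx my x y c d ∧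
     (∀ w, PySem.Dict.get? vis (pvKeyN map x y c d) = some w → score + 1 < w) ∧
     pvRelaxA map mx my x y c score (q, vis) d =
       (PySem.List.insertBy pvLtE (pvKeyN map x y c d, score + 1) q,
        PySem.Dict.insert vis (pvKeyN map x y c d) (score + 1)) ∧
     pvRelaxB map mx my x y c score (p, vis) d =
       (p ++ [pvKeyN map x y c d], PySem.Dict.insert vis (pvKeyN map x y c d) (score + 1))) := by
  simp only [pvRelaxA, pvRelaxB, pvPushA]
  by_cases hb : 0 ≤ x + d.1 ∧ x + d.1 < mx ∧ 0 ≤ y + d.2 ∧ y + d.2 < my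
  · rw [if_pos hb, if_pos hb]
    by_cases hc : pvCell map (x + d.1) (y + d.2) = true
    · have hkc : (if pvCell map (x + d.1) (y + d.2) = true then c else c - 1) = c := if_pos hc
      have hkey : pvKeyN map x y c d = (x + d.1, y + d.2, c) := by rw [pvKeyN, hkc]
      rw [hkey, if_pos hc, if_pos (Or.inl hc), hkc, pvBetter_eq]
      cases himp : pvImproves vis (x + d.1, y + d.2, c) (score + 1) with
      | true =>
        right
        refine ⟨⟨hb, Or.inl hc⟩, ?_, by simp, by simp⟩
        intro w hw
        rw [pvImproves, hw] at himp
        simpa using himp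
      | false =>
        have hif : ¬ pvImproves vis (x + d.1, y + d.2, c) (score + 1) = true := by simp [himp]
        left
        refine ⟨by simp, by simp, ?_⟩
        intro _
        rw [pvImproves] at himp
        cases hg : PySem.Dict.get? vis (x + d.1, y + d.2, c) with
        | none => rw [hg] at himp; simp at himp
        | some w => rw [hg] at himp; exact ⟨w, rfl, by simpa using himp⟩
    · have hkc : (if pvCell map (x + d.1) (y + d.2) = true then c else c - 1) = c - 1 := if_neg hc
      have hkey : pvKeyN map x y c d = (x + d.1, y + d.2, c - 1) := by rw [pvKeyN, hkc]
      rw [hkey, if_neg hc]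
      by_cases hcp : 0 < c
      · rw [if_pos hcp, if_pos (Or.inr hcp), hkc, pvBetter_eq]
        cases himp : pvImproves vis (x + d.1, y + d.2, c - 1) (score + 1) with
        | true =>
          right
          refine ⟨⟨hb, Or.inr hcp⟩, ?_, by simp, by simp⟩
          intro w hw
          rw [pvImproves, hw] at himp
          simpa using himp
        | false =>
          have hif : ¬ pvImproves vis (x + d.1, y + d.2, c - 1) (score + 1) = true := by simp [himp]
          left
          refine ⟨by simp, by simp, ?_⟩
          intro _
          rw [pvImproves] at himp
          cases hg : PySem.Dict.get? vis (x + d.1, y + d.2, c - 1) with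
          | none => rw [hg] at himp; simp at himp
          | some w => rw [hg] at himp; exact ⟨w, rfl, by simpa using himp⟩
      · rw [if_neg hcp, if_neg (show ¬ (pvCell map (x + d.1) (y + d.2) = true ∨ 0 < c) from
          fun hor => hor.elim (fun h1 => hc h1) (fun h2 => hcp h2))]
        left
        exact ⟨rfl, rfl, fun hok => (hok.2).elim (fun h1 => absurd h1 hc) (fun h2 => absurd h2 hcp)⟩
  · rw [if_neg hb, if_neg hb]
    left
    exact ⟨rfl, rfl, fun hok => absurd hok.1 hb⟩

-- the whole neighbour fold: the two sides produce the same dict, the queue/worklist stay in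
-- state-multiset correspondence, values never grow, changed keys carry fresh entries, and every
-- valid neighbour of the processed state ends ≤ score + 1
lemma pvFoldSim (map : List (List Bool)) (mx my x y c score : Int) :
    ∀ (ds : List (Int × Int)) (q : List ((Int × Int × Int) × Int)) (p : List (Int × Int × Int))
      (vis : PySem.Dict (Int × Int × Int) Int)
      (qf : List ((Int × Int × Int) × Int)) (visf : PySem.Dict (Int × Int × Int) Int)
      (pf : List (Int × Int × Int)) (visf2 : PySem.Dict (Int × Int × Int) Int),
      pvSortedQ q → (q.map Prod.fst).Perm p →
      ds.foldl (pvRelaxA map mx my x y c score) (q, vis) = (qf, visf) →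
      ds.foldl (pvRelaxB map mx my x y c score) (p, vis) = (pf, visf2) →
      visf2 = visf ∧ pvSortedQ qf ∧ (qf.map Prod.fst).Perm pf ∧ pvVisLE visf vis ∧
      (∀ e ∈ q, e ∈ qf) ∧
      (∀ k w, PySem.Dict.get? visf k = some w →
        PySem.Dict.get? vis k = some w ∨ ((k, w) ∈ qf ∧ w = score + 1)) ∧
      (∀ e ∈ qf, e ∈ q ∨ ∃ w, PySem.Dict.get? visf e.1 = some w ∧ w ≤ e.2) ∧
      (∀ d ∈ ds, pvOkN map mx my x y c d →
        ∃ w, PySem.Dict.get? visf (pvKeyN map x y c d) = some w ∧ w ≤ score + 1) := by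
  intro ds
  induction ds with
  | nil =>
    intro q p vis qf visf pf visf2 hs hperm hfa hfb
    simp only [List.foldl_nil, Prod.mk.injEq] at hfa hfb
    obtain ⟨rfl, rfl⟩ := hfa
    obtain ⟨rfl, rfl⟩ := hfb
    exact ⟨rfl, hs, hperm, pvVisLE_refl _, fun e he => he,
      fun k w hw => Or.inl hw, fun e he => Or.inl he, by simp⟩
  | cons d ds ih =>
    intro q p vis qf visf pf visf2 hs hperm hfa hfb
    rw [List.foldl_cons] at hfa hfb
    rcases pvStep map mx my x y c score d q p vis with ⟨ha, hb, hok⟩ | ⟨hok, himp, ha, hb⟩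
    · rw [ha] at hfa
      rw [hb] at hfb
      obtain ⟨h1, h2, h3, h4, h5, h6, h7, h8⟩ := ih q p vis qf visf pf visf2 hs hperm hfa hfb
      refine ⟨h1, h2, h3, h4, h5, h6, h7, ?_⟩
      intro d' hd' hok'
      rcases List.mem_cons.mp hd' with rfl | hd''
      · obtain ⟨w, hw, hwle⟩ := hok hok'
        obtain ⟨w', hw', hle'⟩ := h4 _ w hw
        exact ⟨w', hw', le_trans hle' hwle⟩
      · exact h8 d' hd'' hok'
    · rw [ha] at hfa
      rw [hb] at hfb
      have hperm1 : ((PySem.List.insertBy pvLtE (pvKeyN map x y c d, score + 1) q).map Prod.fst).Perm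
          (p ++ [pvKeyN map x y c d]) := by
        refine ((pvInsertBy_perm _ q).map Prod.fst).trans ?_
        exact ((hperm.cons (pvKeyN map x y c d)).trans (List.perm_append_singleton _ p).symm)
      obtain ⟨h1, h2, h3, h4, h5, h6, h7, h8⟩ := ih _ _ _ qf visf pf visf2
        (pvInsertBy_sorted hs) hperm1 hfa hfb
      have hleIns : pvVisLE (PySem.Dict.insert vis (pvKeyN map x y c d) (score + 1)) vis :=
        pvVisLE_insert himp
      have hmemNew : (pvKeyN map x y c d, score + 1) ∈ qf :=
        h5 _ (by rw [PySem.List.mem_insertBy]; left; rfl)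
      refine ⟨h1, h2, h3, pvVisLE_trans h4 hleIns, ?_, ?_, ?_, ?_⟩
      · intro e he
        exact h5 e (by rw [PySem.List.mem_insertBy]; right; exact he)
      · intro k w hw
        rcases h6 k w hw with hw1 | hent
        · by_cases hk : k = pvKeyN map x y c d
          · subst hk
            rw [PySem.Dict.get?_insert_self] at hw1
            injection hw1 with hw2
            right
            exact ⟨hw2 ▸ hmemNew, hw2.symm⟩
          · rw [PySem.Dict.get?_insert_of_ne vis _ hk] at hw1
            exact Or.inl hw1
        · exact Or.inr hent
      · intro e he
        rcases h7 e he with he1 | hv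
        · rw [PySem.List.mem_insertBy] at he1
          rcases he1 with rfl | he2
          · right
            have : PySem.Dict.get? (PySem.Dict.insert vis (pvKeyN map x y c d) (score + 1))
                (pvKeyN map x y c d) = some (score + 1) := PySem.Dict.get?_insert_self _ _ _
            obtain ⟨w, hw, hle⟩ := h4 _ _ this
            exact ⟨w, hw, hle⟩
          · exact Or.inl he2
        · exact Or.inr hv
      · intro d' hd' hok'
        rcases List.mem_cons.mp hd' with rfl | hd''
        · have : PySem.Dict.get? (PySem.Dict.insert vis (pvKeyN map x y c d') (score + 1))
              (pvKeyN map x y c d') = some (score + 1) := PySem.Dict.get?_insert_self _ _ _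
          obtain ⟨w, hw, hle⟩ := h4 _ _ this
          exact ⟨w, hw, hle⟩
        · exact h8 d' hd'' hok'

-- the two invariants the main loop maintains over 'visited'
def pvInv3 (qa : List ((Int × Int × Int) × Int)) (vis : PySem.Dict (Int × Int × Int) Int) : Prop :=
  ∀ e ∈ qa, ∃ w, PySem.Dict.get? vis e.1 = some w ∧ w ≤ e.2

def pvInv4 (map : List (List Bool)) (mx my : Int) (qa : List ((Int × Int × Int) × Int))
    (vis : PySem.Dict (Int × Int × Int) Int) : Prop :=
  ∀ k w, PySem.Dict.get? vis k = some w → (k, w) ∈ qa ∨ pvNoop map mx my k w vis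

-- the two loops agree step for step, for EVERY fuel value
lemma pvRunSim (map : List (List Bool)) (mx my : Int) :
    ∀ (f : Nat) (qa : List ((Int × Int × Int) × Int)) (pb : List (Int × Int × Int))
      (vis : PySem.Dict (Int × Int × Int) Int),
      pvSortedQ qa → (qa.map Prod.fst).Perm pb → pvInv3 qa vis → pvInv4 map mx my qa vis →
      pvRunA map mx my f qa vis = pvRunB map mx my f pb vis := by
  intro f
  induction f with
  | zero => intro qa pb vis _ _ _ _; rfl
  | succ f ih =>
    intro qa pb vis hs hperm h3 h4
    cases qa with
    | nil =>
      simp only [List.map_nil] at hperm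
      have hpb : pb = [] := hperm.symm.eq_nil
      subst hpb
      rfl
    | cons e rest =>
      cases pb with
      | nil => exact absurd hperm.eq_nil (by simp)
      | cons h t =>
        -- the scanned minimum state is the head entry's state
        have hscan : t.foldl (fun a b => if pvLtK b a then b else a) h = e.1 := by
          set m := t.foldl (fun a b => if pvLtK b a then b else a) h with hm
          have hmem : m ∈ h :: t := pvScanK_mem t h
          have hmem' : m ∈ (e :: rest).map Prod.fst := hperm.symm.subset hmem
          have hme : pvLtK m e.1 = false := by
            rcases List.mem_map.mp hmem' with ⟨e', he', heq⟩
            rw [← heq]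
            rcases List.mem_cons.mp he' with rfl | he''
            · rw [pvLtK_false_iff]; omega
            · rw [pvSortedQ, List.pairwise_cons] at hs
              exact pvLtE_false_state (hs.1 e' he'')
          have hem : pvLtK e.1 m = false :=
            pvScanK_min t h e.1 (hperm.subset (by simp))
          exact pvLtK_antisymm hme hem
        have heInPb : e.1 ∈ h :: t := hperm.subset (by simp)
        have hrestPerm : (rest.map Prod.fst).Perm (pvEraseK e.1 (h :: t)) := by
          have h1 : (e.1 :: pvEraseK e.1 (h :: t)).Perm (h :: t) := pvEraseK_perm heInPb
          exact ((hperm.trans h1.symm)).cons_inv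
        obtain ⟨v, hv, hvle⟩ := h3 e (by simp)
        have hsrest : pvSortedQ rest := by
          rw [pvSortedQ, List.pairwise_cons] at hs; exact hs.2
        have h3rest : pvInv3 rest vis := fun e' he' => h3 e' (by simp [he'])
        by_cases hst : pvStale vis e.1 e.2 = true
        · -- stale pop: A skips; B's relaxation is a no-op
          have hvlt : v < e.2 := by
            rw [pvStale, hv] at hst; simpa using hst
          have hnoop : pvNoop map mx my e.1 v vis := by
            rcases h4 e.1 v hv with hmem | hn
            · exfalso
              rcases List.mem_cons.mp hmem with heq | hmemr
              · have : v = e.2 := congrArg Prod.snd heq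
                omega
              · rw [pvSortedQ, List.pairwise_cons] at hs
                have := hs.1 _ hmemr
                rw [pvLtE_false_iff] at this
                dsimp at this
                omega
            · exact hn
          have hA : pvRunA map mx my (f + 1) (e :: rest) vis = pvRunA map mx my f rest vis := by
            rw [pvRunA, if_pos hst]
          have hgd : PySem.Dict.getD vis e.1 0 = v := PySem.Dict.getD_of_get?_eq_some vis 0 hv
          have hB : pvRunB map mx my (f + 1) (h :: t) vis =
              pvRunB map mx my f (pvEraseK e.1 (h :: t)) vis := by
            rw [pvRunB]
            simp only [hscan, hgd]
            rw [pvNoopFoldB map mx my e.1 v pvDirs _ vis hnoop]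
          rw [hA, hB]
          refine ih rest _ vis hsrest hrestPerm h3rest ?_
          intro k w hw
          rcases h4 k w hw with hmem | hn
          · rcases List.mem_cons.mp hmem with heq | hmemr
            · exfalso
              have hk : k = e.1 := congrArg Prod.fst heq
              have hwv : w = e.2 := congrArg Prod.snd heq
              rw [hk, hv] at hw
              have : w = v := by injection hw.symm
              omega
            · exact Or.inl hmemr
          · exact Or.inr hn
        · -- fresh pop: both sides relax at the same score
          have hveq : v = e.2 := by
            rw [pvStale, hv] at hst
            simp at hst
            omega
          have hgd : PySem.Dict.getD vis e.1 0 = e.2 := by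
            rw [PySem.Dict.getD_of_get?_eq_some vis 0 hv, hveq]
          obtain ⟨qf, visf, hfa⟩ : ∃ qf visf,
              pvDirs.foldl (pvRelaxA map mx my e.1.1 e.1.2.1 e.1.2.2 e.2) (rest, vis) = (qf, visf) :=
            ⟨_, _, rfl⟩
          obtain ⟨pf, visf2, hfb⟩ : ∃ pf visf2,
              pvDirs.foldl (pvRelaxB map mx my e.1.1 e.1.2.1 e.1.2.2 e.2)
                (pvEraseK e.1 (h :: t), vis) = (pf, visf2) :=
            ⟨_, _, rfl⟩
          obtain ⟨h1, h2, hp, hle, hkeep, hchg, hback, hnb⟩ :=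
            pvFoldSim map mx my e.1.1 e.1.2.1 e.1.2.2 e.2 pvDirs rest _ vis qf visf pf visf2
              hsrest hrestPerm hfa hfb
          have hA : pvRunA map mx my (f + 1) (e :: rest) vis = pvRunA map mx my f qf visf := by
            rw [pvRunA, if_neg (by simp [hst])]
            simp only [hfa]
          have hB : pvRunB map mx my (f + 1) (h :: t) vis = pvRunB map mx my f pf visf2 := by
            rw [pvRunB]
            simp only [hscan, hgd, hfb]
          rw [hA, hB, h1]
          refine ih qf pf visf h2 hp ?_ ?_
          · -- Inv3 for the next round
            intro e' he'
            rcases hback e' he' with he'' | hv'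
            · obtain ⟨w, hw, hwle⟩ := h3rest e' he''
              obtain ⟨w', hw', hle'⟩ := hle _ w hw
              exact ⟨w', hw', le_trans hle' hwle⟩
            · exact hv'
          · -- Inv4 for the next round
            intro k w hw
            rcases hchg k w hw with hold | ⟨hent, _⟩
            · rcases h4 k w hold with hmem | hn
              · rcases List.mem_cons.mp hmem with heq | hmemr
                · -- k is the processed state: its relaxation just happened
                  have hk : k = e.1 := congrArg Prod.fst heq
                  have hwv : w = e.2 := by
                    have : v = w := by rw [hk, hv] at hold; injection hold
                    omega
                  right
                  subst hk
                  intro d hd hok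
                  have := hnb d hd
                  rw [hwv]
                  exact this hok
                · exact Or.inl (hkeep _ hmemr)
              · exact Or.inr (pvNoop_mono hle hn)
            · exact Or.inl hent

-- ===== VERDICT (by name: the statement is the Claim_ definition above) =====
theorem dijkstra_with_cheats_spec : Claim_equal_dijkstra_with_cheats := by
  intro map start _hdom _hpre
  unfold Spec_dijkstra_with_cheats
  simp only [dijkstra_with_cheats, dijkstra_with_cheats_alt]
  have hq0 : PySem.List.insertBy pvLtE ((start.1, start.2, (1 : Int)), (0 : Int)) [] =
      [((start.1, start.2, (1 : Int)), (0 : Int))] := by simp [PySem.List.insertBy]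
  rw [hq0]
  have hsorted : pvSortedQ [((start.1, start.2, (1 : Int)), (0 : Int))] := by
    rw [pvSortedQ]; exact List.pairwise_singleton _ _
  have hperm : (([((start.1, start.2, (1 : Int)), (0 : Int))]).map Prod.fst).Perm
      [(start.1, start.2, (1 : Int))] := by simp
  have hinv3 : pvInv3 [((start.1, start.2, (1 : Int)), (0 : Int))]
      (PySem.Dict.insert PySem.Dict.empty (start.1, start.2, (1 : Int)) 0) := by
    intro e he
    rcases List.mem_singleton.mp he with rfl
    exact ⟨0, PySem.Dict.get?_insert_self _ _ _, le_refl 0⟩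
  have hinv4 : ∀ mx my : Int, pvInv4 map mx my [((start.1, start.2, (1 : Int)), (0 : Int))]
      (PySem.Dict.insert PySem.Dict.empty (start.1, start.2, (1 : Int)) 0) := by
    intro mx my k w hw
    left
    by_cases hk : k = (start.1, start.2, (1 : Int))
    · subst hk
      rw [PySem.Dict.get?_insert_self] at hw
      injection hw with hw2
      rw [← hw2]
      exact List.mem_singleton.mpr rfl
    · rw [PySem.Dict.get?_insert_of_ne _ _ hk, PySem.Dict.get?_empty] at hw
      cases hw
  exact congrArg
    (fun d : PySem.Dict (Int × Int × Int) Int => d.items.map (fun p => (p.1.1, p.1.2.1, p.1.2.2, p.2)))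
    (pvRunSim map _ _ _ _ _ _ hsorted hperm hinv3 (hinv4 _ _))
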